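-- pv_equiv track=rewrite | github.com/Teal-Insights/sovereign-prospectus-corpus | demo/data/export_data.py | reflow_text
-- ===== SOURCE A (Python) =====
-- def reflow_text(text: str) -> str:
--     """Reflow broken PyMuPDF text where words are split across lines.
--
--     PyMuPDF sometimes extracts multi-column PDFs word-by-word, producing
--     'The\nBonds\ncontain\n"collective\naction"' instead of flowing prose.
--     This heuristic joins short lines that look like broken fragments.
--
--     Only apply to PyMuPDF-parsed text (PDIP/NSM PDFs), NOT EDGAR HTML.
--     """
--     # Fix hyphenation across lines
--     text = text.replace("-\n", "")
--
--     lines = text.split("\n")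
--     result: list[str] = []
--     i = 0
--     while i < len(lines):
--         line = lines[i]
--         stripped = line.strip()
--
--         # Blank line = paragraph break, keep it
--         if not stripped:
--             result.append("")
--             i += 1
--             continue
--
--         # Accumulate fragments
--         while i + 1 < len(lines):
--             next_line = lines[i + 1].strip()
--             if not next_line:
--                 break  # paragraph break
--             # Current line is short and doesn't end with terminal punctuation
--             if (
--                 len(stripped) < 60
--                 and not stripped.endswith((".", ":", ";", "?", "!"))
--                 and (next_line[0].islower() or len(stripped) < 15)
--             ):
--                 stripped = stripped + " " + next_line
--                 i += 1
--             else: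
--                 break
--
--         result.append(stripped)
--         i += 1
--
--     return "\n".join(result)
-- ===== SOURCE B (Python) =====
-- def reflow_text(text: str) -> str:
--     """Reflow broken PyMuPDF text where words are split across lines.
--
--     Single pass with a `current` accumulator instead of nested while/index.
--     """
--     text = text.replace("-\n", "")
--     result: list[str] = []
--     current = None
--     for line in text.split("\n"):
--         stripped = line.strip()
--         if not stripped:
--             if current is not None:
--                 result.append(current)
--                 current = None
--             result.append("")
--         elif current is None:
--             current = stripped
--         elif (
--             len(current) < 60
--             and not current.endswith((".", ":", ";", "?", "!"))
--             and (stripped[0].islower() or len(current) < 15)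
--         ):
--             current = current + " " + stripped
--         else:
--             result.append(current)
--             current = stripped
--     if current is not None:
--         result.append(current)
--     return "\n".join(result)
-- ===== Notes on version B (the rewrite author's own statement) =====
-- stated objective: simpler
-- what changed: Replaces A's nested while-loops with explicit index bookkeeping by a single flat pass over the lines carrying an optional `current` accumulator that is merged, flushed or started per line.
import Mathlib
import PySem

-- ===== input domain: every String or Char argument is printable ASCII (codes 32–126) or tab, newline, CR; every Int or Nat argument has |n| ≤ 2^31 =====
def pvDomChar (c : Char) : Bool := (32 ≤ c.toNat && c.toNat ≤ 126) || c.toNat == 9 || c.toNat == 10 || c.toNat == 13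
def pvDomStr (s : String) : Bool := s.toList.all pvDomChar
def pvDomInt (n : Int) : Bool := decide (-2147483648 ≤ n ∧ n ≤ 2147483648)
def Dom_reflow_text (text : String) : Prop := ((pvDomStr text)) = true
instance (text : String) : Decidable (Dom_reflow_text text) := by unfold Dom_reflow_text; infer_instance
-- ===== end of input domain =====

-- B replaces A's nested while/index loops by one flat pass with a `current` accumulator (simpler decomposition, same cost).

-- the merge condition both Pythons spell out literally
def mergeCond (cur next : String) : Bool :=
  decide (PySem.Str.len cur < 60) &&
  !(PySem.Str.endswith cur "." || PySem.Str.endswith cur ":" || PySem.Str.endswith cur ";" ||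
    PySem.Str.endswith cur "?" || PySem.Str.endswith cur "!") &&
  ((match PySem.Str.pyGet? next 0 with
    | some c => PySem.Chars.islower c
    | none => false) || decide (PySem.Str.len cur < 15))

-- ===== PORT A =====
-- A's inner while-loop: accumulate following fragments, returning the grown line and the new index.
-- `fuel` is only a structural-termination guard; every call receives enough of it (≥ lines.length).
def reflowInner (lines : List String) (stripped : String) (i : Nat) : Nat → String × Nat
  | 0 => (stripped, i)
  | fuel + 1 =>
    if h : i + 1 < lines.length then
      let next := PySem.Str.strip lines[i + 1]
      if next = "" then (stripped, i)
      else if mergeCond stripped next then reflowInner lines (stripped ++ " " ++ next) (i + 1) fuel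
      else (stripped, i)
    else (stripped, i)

-- A's outer while-loop over the index i; `fuel` again only a termination guard (≥ lines.length - i).
def reflowOuter (lines : List String) (i : Nat) (result : List String) : Nat → List String
  | 0 => result
  | fuel + 1 =>
    if h : i < lines.length then
      let stripped := PySem.Str.strip lines[i]
      if stripped = "" then reflowOuter lines (i + 1) (result ++ [""]) fuel
      else
        let p := reflowInner lines stripped i lines.length
        reflowOuter lines (p.2 + 1) (result ++ [p.1]) fuel
    else result

def reflow_text (text : String) : String :=
  let t := PySem.Str.replace text "-\n" ""
  let lines := (PySem.Str.split? t "\n").getD []  -- sep "\n" ≠ "", so split? is some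
  PySem.Str.join "\n" (reflowOuter lines 0 [] lines.length)

-- ===== PORT B =====
-- B's per-line step: state = (finished lines, optional current accumulator)
def stepB (acc : List String × Option String) (line : String) : List String × Option String :=
  let stripped := PySem.Str.strip line
  if stripped = "" then
    match acc.2 with
    | some c => (acc.1 ++ [c, ""], none)
    | none => (acc.1 ++ [""], none)
  else
    match acc.2 with
    | none => (acc.1, some stripped)
    | some c =>
      if mergeCond c stripped then (acc.1, some (c ++ " " ++ stripped))
      else (acc.1 ++ [c], some stripped)

def reflow_text_alt (text : String) : String :=
  let t := PySem.Str.replace text "-\n" ""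
  let lines := (PySem.Str.split? t "\n").getD []  -- sep "\n" ≠ "", so split? is some
  let p := lines.foldl stepB ([], none)
  PySem.Str.join "\n" (p.1 ++ p.2.toList)

-- ===== PRECONDITION & SPEC =====
def Spec_reflow_text (text : String) (out : String) : Prop := out = reflow_text_alt text
instance (text : String) (out : String) : Decidable (Spec_reflow_text text out) := by unfold Spec_reflow_text; infer_instance

-- ===== CLAIM (what is proved, stated in full; the proofs are below) =====
def Claim_equal_reflow_text : Prop := ∀ (text : String), Dom_reflow_text text → Spec_reflow_text text (reflow_text text)

-- ===== LEMMAS AND PROOFS =====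

def flushB (p : List String × Option String) : List String := p.1 ++ p.2.toList

-- the inner loop's result does not depend on the fuel, as long as the fuel suffices
theorem reflowInner_fuel (lines : List String) :
    ∀ (f₁ : Nat) (s : String) (i : Nat) (f₂ : Nat),
      lines.length ≤ i + 1 + f₁ → lines.length ≤ i + 1 + f₂ →
      reflowInner lines s i f₁ = reflowInner lines s i f₂ := by
  intro f₁
  induction f₁ with
  | zero =>
    intro s i f₂ h₁ h₂
    cases f₂ with
    | zero => rfl
    | succ g => rw [reflowInner, reflowInner, dif_neg (by omega : ¬ i + 1 < lines.length)]
  | succ f ih =>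
    intro s i f₂ h₁ h₂
    by_cases hi : i + 1 < lines.length
    · cases f₂ with
      | zero => exfalso; omega
      | succ g =>
        rw [reflowInner, reflowInner, dif_pos hi, dif_pos hi]
        by_cases hb : PySem.Str.strip lines[i + 1] = ""
        · simp only [hb, if_pos]
        · by_cases hm : mergeCond s (PySem.Str.strip lines[i + 1])
          · simp only [if_neg hb, if_pos hm]
            exact ih _ (i + 1) g (by omega) (by omega)
          · simp only [if_neg hb, if_neg hm]
    · cases f₂ with
      | zero => rw [reflowInner, reflowInner, dif_neg hi]
      | succ g => rw [reflowInner, reflowInner, dif_neg hi, dif_neg hi]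

-- the loop invariant: B's flat fold, started in either state, computes exactly what A's
-- nested loops compute from index i (for any sufficient fuel)
theorem main_inv (k : Nat) : ∀ (lines : List String) (i : Nat) (result : List String),
    lines.length - i ≤ k →
    ((∀ (s : String) (f : Nat), lines.length - (i + 1) ≤ f →
        flushB ((lines.drop (i + 1)).foldl stepB (result, some s)) =
          reflowOuter lines ((reflowInner lines s i lines.length).2 + 1)
            (result ++ [(reflowInner lines s i lines.length).1]) f)
     ∧ (∀ (f : Nat), lines.length - i ≤ f →
        flushB ((lines.drop i).foldl stepB (result, none)) = reflowOuter lines i result f)) := by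
  induction k with
  | zero =>
    intro lines i result hk
    have hd1 : lines.drop (i + 1) = [] := List.drop_eq_nil_of_le (by omega)
    have hd0 : lines.drop i = [] := List.drop_eq_nil_of_le (by omega)
    have hInner : ∀ s : String, reflowInner lines s i lines.length = (s, i) := by
      intro s
      rw [reflowInner_fuel lines lines.length s i 0 (by omega) (by omega), reflowInner]
    constructor
    · intro s f hf
      rw [hInner]
      cases f with
      | zero => simp [hd1, flushB, reflowOuter]
      | succ g =>
        rw [reflowOuter, dif_neg (by omega : ¬ i + 1 < lines.length)]
        simp [hd1, flushB]
    · intro f hf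
      cases f with
      | zero => simp [hd0, flushB, reflowOuter]
      | succ g =>
        rw [reflowOuter, dif_neg (by omega : ¬ i < lines.length)]
        simp [hd0, flushB]
  | succ k ih =>
    intro lines i result hk
    have hQ : ∀ (s : String) (f : Nat), lines.length - (i + 1) ≤ f →
        flushB ((lines.drop (i + 1)).foldl stepB (result, some s)) =
          reflowOuter lines ((reflowInner lines s i lines.length).2 + 1)
            (result ++ [(reflowInner lines s i lines.length).1]) f := by
      intro s f hf
      by_cases hi1 : i + 1 < lines.length
      · obtain ⟨L, hL⟩ : ∃ L, lines.length = L + 1 := ⟨lines.length - 1, by omega⟩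
        obtain ⟨g, hg⟩ : ∃ g, f = g + 1 := ⟨f - 1, by omega⟩
        have hd1 : lines.drop (i + 1) = lines[i + 1] :: lines.drop (i + 2) :=
          List.drop_eq_getElem_cons hi1
        rw [hd1]
        have hIu : reflowInner lines s i lines.length =
            if PySem.Str.strip lines[i + 1] = "" then (s, i)
            else if mergeCond s (PySem.Str.strip lines[i + 1]) then
              reflowInner lines (s ++ " " ++ PySem.Str.strip lines[i + 1]) (i + 1) L
            else (s, i) := by
          conv_lhs => rw [hL, reflowInner, dif_pos hi1]
        by_cases hb : PySem.Str.strip lines[i + 1] = ""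
        · -- blank: A's inner breaks, A's outer then emits ""; B flushes and emits ""
          have hs : stepB (result, some s) lines[i + 1] = (result ++ [s, ""], none) := by
            simp [stepB, hb]
          rw [List.foldl_cons, hs, hIu, if_pos hb]
          rw [hg, reflowOuter, dif_pos hi1]
          simp only [hb, if_pos]
          have := (ih lines (i + 2) (result ++ [s, ""]) (by omega)).2 g (by omega)
          simpa using this
        · by_cases hm : mergeCond s (PySem.Str.strip lines[i + 1])
          · -- merge: both grow the accumulator
            have hs : stepB (result, some s) lines[i + 1] =
                (result, some (s ++ " " ++ PySem.Str.strip lines[i + 1])) := by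
              simp [stepB, hb, hm]
            rw [List.foldl_cons, hs, hIu, if_neg hb, if_pos hm,
              reflowInner_fuel lines L _ (i + 1) lines.length (by omega) (by omega)]
            exact (ih lines (i + 1) result (by omega)).1 _ f (by omega)
          · -- no merge: A's inner breaks and the outer restarts at i+1; B flushes s
            have hs : stepB (result, some s) lines[i + 1] =
                (result ++ [s], some (PySem.Str.strip lines[i + 1])) := by
              simp [stepB, hb, hm]
            rw [List.foldl_cons, hs, hIu, if_neg hb, if_neg hm]
            rw [hg, reflowOuter, dif_pos hi1]
            simp only [hb, if_false]
            have := (ih lines (i + 1) (result ++ [s]) (by omega)).1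
              (PySem.Str.strip lines[i + 1]) g (by omega)
            simpa using this
      · -- i+1 past the end: inner returns immediately, outer stops, B just flushes
        have hd1 : lines.drop (i + 1) = [] := List.drop_eq_nil_of_le (by omega)
        have hInner : reflowInner lines s i lines.length = (s, i) := by
          rw [reflowInner_fuel lines lines.length s i 0 (by omega) (by omega), reflowInner]
        rw [hInner]
        cases f with
        | zero => simp [hd1, flushB, reflowOuter]
        | succ g =>
          rw [reflowOuter, dif_neg hi1]
          simp [hd1, flushB]
    refine ⟨hQ, ?_⟩
    intro f hf
    by_cases hi : i < lines.length
    · obtain ⟨g, hg⟩ : ∃ g, f = g + 1 := ⟨f - 1, by omega⟩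
      have hd0 : lines.drop i = lines[i] :: lines.drop (i + 1) := List.drop_eq_getElem_cons hi
      rw [hd0, List.foldl_cons, hg, reflowOuter, dif_pos hi]
      by_cases hsb : PySem.Str.strip lines[i] = ""
      · have hs : stepB (result, none) lines[i] = (result ++ [""], none) := by
          simp [stepB, hsb]
        rw [hs]
        simp only [hsb, if_pos]
        exact (ih lines (i + 1) (result ++ [""]) (by omega)).2 g (by omega)
      · have hs : stepB (result, none) lines[i] = (result, some (PySem.Str.strip lines[i])) := by
          simp [stepB, hsb]
        rw [hs]
        simp only [hsb, if_false]
        exact hQ (PySem.Str.strip lines[i]) g (by omega)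
    · have hd0 : lines.drop i = [] := List.drop_eq_nil_of_le (by omega)
      cases f with
      | zero => simp [hd0, flushB, reflowOuter]
      | succ g =>
        rw [reflowOuter, dif_neg hi]
        simp [hd0, flushB]

-- ===== VERDICT (by name: the statement is the Claim_ definition above) =====
theorem reflow_text_spec : Claim_equal_reflow_text := by
  intro text _
  show PySem.Str.join "\n"
      (reflowOuter ((PySem.Str.split? (PySem.Str.replace text "-\n" "") "\n").getD []) 0 []
        ((PySem.Str.split? (PySem.Str.replace text "-\n" "") "\n").getD []).length) = _
  have h := (main_inv ((PySem.Str.split? (PySem.Str.replace text "-\n" "") "\n").getD []).length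
    ((PySem.Str.split? (PySem.Str.replace text "-\n" "") "\n").getD []) 0 [] (by omega)).2
    ((PySem.Str.split? (PySem.Str.replace text "-\n" "") "\n").getD []).length (by omega)
  simp only [List.drop_zero] at h
  rw [← h]
  rfl
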